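-- pv_equiv track=rewrite | github.com/gdzjhzh/AIInformationProcessor | services/VideoTranscriptAPI/tests/transcript/test_segment_algorithm.py | build_token_position_map
-- ===== SOURCE A (Python) =====
-- from typing import List, Dict, Tuple
--
-- def clean_token(token: str) -> str:
--     """清理 token，去除 BPE 标记"""
--     return token.replace('@@', '')
--
-- def build_token_position_map(tokens: List[str]) -> Tuple[List[int], str]:
--     """
--     构建 token 到字符位置的映射
--
--     Returns:
--         (token_to_char_pos, reconstructed_text)
--         - token_to_char_pos[i]: 第 i 个 token 对应的字符起始位置
--         - reconstructed_text: 重建的完整文本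
--     """
--     token_to_char_pos = []
--     reconstructed = ""
--
--     for token in tokens:
--         token_to_char_pos.append(len(reconstructed))
--         clean = clean_token(token)
--         reconstructed += clean
--
--     # 添加最后一个位置（结束位置）
--     token_to_char_pos.append(len(reconstructed))
--
--     return token_to_char_pos, reconstructed
-- ===== SOURCE B (Python) =====
-- from typing import List, Tuple
--
-- def clean_token(token: str) -> str:
--     return token.replace('@@', '')
--
-- def build_token_position_map(tokens: List[str]) -> Tuple[List[int], str]:
--     # Back-to-front: clean and join once, then walk the cleaned tokens in
--     # REVERSE order accumulating suffix lengths, so each start position is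
--     # total - (length of the suffix from that token on); finally reverse.
--     cleaned = [clean_token(t) for t in tokens]
--     text = ''.join(cleaned)
--     total = len(text)
--     positions = [total]
--     tail = 0
--     for c in reversed(cleaned):
--         tail += len(c)
--         positions.append(total - tail)
--     positions.reverse()
--     return positions, text
-- ===== Notes on version B (the rewrite author's own statement) =====
-- stated objective: alternative
-- what changed: Instead of A's single forward loop that records the running text length and grows the string by repeated concatenation, B joins the cleaned tokens once and then derives each start position backwards, as total length minus the accumulated suffix length while walking the cleaned tokens in reverse, reversing the positions list at the end.
import Mathlib
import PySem

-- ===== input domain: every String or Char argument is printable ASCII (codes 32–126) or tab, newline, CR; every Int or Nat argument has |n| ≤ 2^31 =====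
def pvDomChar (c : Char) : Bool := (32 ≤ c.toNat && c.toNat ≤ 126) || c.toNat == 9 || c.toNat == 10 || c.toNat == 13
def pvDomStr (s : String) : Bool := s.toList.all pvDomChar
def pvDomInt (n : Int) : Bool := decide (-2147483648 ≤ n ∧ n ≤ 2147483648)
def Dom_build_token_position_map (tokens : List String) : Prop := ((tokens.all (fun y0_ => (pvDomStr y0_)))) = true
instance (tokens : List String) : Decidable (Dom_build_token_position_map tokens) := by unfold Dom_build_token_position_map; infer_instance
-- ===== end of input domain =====

-- B replaces A's forward record-then-concatenate loop by joining the cleaned tokens once and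
-- deriving the start positions backwards (total minus accumulated suffix length), then reversing.

-- ===== PORT A =====
def clean_token (token : String) : String := PySem.Str.replace token "@@" ""

def build_token_position_map (tokens : List String) : List Int × String :=
  let st := tokens.foldl
    (fun (st : List Int × String) token =>
      let token_to_char_pos := st.1 ++ [PySem.Str.len st.2]
      let clean := clean_token token
      (token_to_char_pos, st.2 ++ clean))
    ([], "")
  (st.1 ++ [PySem.Str.len st.2], st.2)

-- ===== PORT B =====
def clean_token_b (token : String) : String := PySem.Str.replace token "@@" ""

def build_token_position_map_alt (tokens : List String) : List Int × String :=
  let cleaned := tokens.map clean_token_b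
  let text := PySem.Str.join "" cleaned
  let total : Int := PySem.Str.len text
  let st := cleaned.reverse.foldl
    (fun (st : List Int × Int) c =>
      let tail := st.2 + PySem.Str.len c
      (st.1 ++ [total - tail], tail))
    ([total], 0)
  (st.1.reverse, text)

-- ===== PRECONDITION & SPEC =====
def Spec_build_token_position_map (tokens : List String) (out : List Int × String) : Prop := out = build_token_position_map_alt tokens
instance (tokens : List String) (out : List Int × String) : Decidable (Spec_build_token_position_map tokens out) := by unfold Spec_build_token_position_map; infer_instance

-- ===== CLAIM (what is proved, stated in full; the proofs are below) =====
def Claim_equal_build_token_position_map : Prop := ∀ (tokens : List String), Dom_build_token_position_map tokens → Spec_build_token_position_map tokens (build_token_position_map tokens)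

-- ===== LEMMAS AND PROOFS =====

theorem join_empty_cons (a : String) (rest : List String) :
    PySem.Str.join "" (a :: rest) = a ++ PySem.Str.join "" rest := by
  apply String.toList_injective
  cases rest <;> simp [PySem.Str.join, PySem.Chars.join, List.intercalate]

theorem join_empty_nil : PySem.Str.join "" ([] : List String) = "" := by decide

theorem len_join (ss : List String) :
    PySem.Str.len (PySem.Str.join "" ss) = (ss.map PySem.Str.len).sum := by
  induction ss with
  | nil => simp [join_empty_nil]
  | cons a rest ih => rw [join_empty_cons, PySem.Str.len_append, ih]; simp

/-- Invariant of A's loop: the final positions list (with the appended end position) is the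
starting list followed by the prefix sums of the cleaned-token lengths seeded with the current
text length, and the final text is the current text followed by the join of the cleaned tokens. -/
theorem foldA_key (ts : List String) : ∀ (p : List Int) (r : String),
    (ts.foldl
      (fun (st : List Int × String) token =>
        (st.1 ++ [PySem.Str.len st.2], st.2 ++ clean_token token)) (p, r)).1
      ++ [PySem.Str.len (ts.foldl
      (fun (st : List Int × String) token =>
        (st.1 ++ [PySem.Str.len st.2], st.2 ++ clean_token token)) (p, r)).2]
    = p ++ (ts.map (fun t => PySem.Str.len (clean_token t))).scanl (· + ·) (PySem.Str.len r)
    ∧ (ts.foldl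
      (fun (st : List Int × String) token =>
        (st.1 ++ [PySem.Str.len st.2], st.2 ++ clean_token token)) (p, r)).2
      = r ++ PySem.Str.join "" (ts.map clean_token) := by
  induction ts with
  | nil => intro p r; simp [join_empty_nil]
  | cons t ts ih =>
    intro p r
    have h := ih (p ++ [PySem.Str.len r]) (r ++ clean_token t)
    refine ⟨?_, ?_⟩
    · rw [List.foldl_cons, h.1]
      simp [List.append_assoc]
    · rw [List.foldl_cons, h.2, List.map_cons, join_empty_cons, String.append_assoc]

/-- Characterisation of B's reverse loop (as a foldr over the cleaned tokens' lengths):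
the accumulated tail is the sum, and the positions list is [total] followed by the
reversed dropLast of the scanl of prefix sums seeded at total - sum. -/
theorem foldB_key (total : Int) (ls : List Int) :
    ls.foldr (fun l (st : List Int × Int) => (st.1 ++ [total - (st.2 + l)], st.2 + l)) ([total], 0)
    = ([total] ++ ((ls.scanl (· + ·) (total - ls.sum)).dropLast).reverse, ls.sum) := by
  induction ls with
  | nil => simp
  | cons l ls ih =>
    rw [List.foldr_cons, ih]
    have h1 : total - (l :: ls).sum + l = total - ls.sum := by simp; ring
    have h2 : (ls.scanl (· + ·) (total - ls.sum)) ≠ [] := by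
      cases ls <;> simp [List.scanl]
    refine Prod.ext ?_ ?_
    · show _ = [total] ++ _
      rw [List.scanl_cons, h1, List.dropLast_cons_of_ne_nil h2, List.reverse_cons]
      simp
      ring
    · simp; ring

theorem scanl_decomp (ls : List Int) : ∀ (c : Int),
    (ls.scanl (· + ·) c).dropLast ++ [c + ls.sum] = ls.scanl (· + ·) c := by
  induction ls with
  | nil => intro c; simp [List.scanl]
  | cons l ls ih =>
    intro c
    have h2 : (ls.scanl (· + ·) (c + l)) ≠ [] := by
      cases ls <;> simp [List.scanl]
    rw [List.scanl_cons, List.dropLast_cons_of_ne_nil h2, List.cons_append]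
    have : c + (l :: ls).sum = (c + l) + ls.sum := by simp; ring
    rw [this, ih]

-- ===== VERDICT (by name: the statement is the Claim_ definition above) =====
theorem build_token_position_map_spec : Claim_equal_build_token_position_map := by
  intro tokens _
  unfold Spec_build_token_position_map build_token_position_map build_token_position_map_alt
  dsimp only
  have hA := foldA_key tokens [] ""
  have hc : clean_token_b = clean_token := rfl
  set cleaned := tokens.map clean_token with hcl
  set total : Int := PySem.Str.len (PySem.Str.join "" cleaned) with ht
  have hsum : total = (cleaned.map PySem.Str.len).sum := len_join cleaned
  refine Prod.ext ?_ ?_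
  · show _ = (_ : List Int)
    rw [List.foldl_reverse]
    have hB := foldB_key total (cleaned.map PySem.Str.len)
    -- the foldr over cleaned equals the foldr over the lengths, mapped through Str.len
    have hfr : cleaned.foldr
        (fun c (st : List Int × Int) => (st.1 ++ [total - (st.2 + PySem.Str.len c)], st.2 + PySem.Str.len c)) ([total], 0)
      = (cleaned.map PySem.Str.len).foldr
        (fun l (st : List Int × Int) => (st.1 ++ [total - (st.2 + l)], st.2 + l)) ([total], 0) := by
      simp only [hcl, List.foldr_map]
    simp only [hc]
    rw [hfr, hB]
    dsimp only
    have hlen0 : PySem.Str.len "" = (0 : Int) := by decide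
    have hmap : tokens.map (fun t => PySem.Str.len (clean_token t)) = cleaned.map PySem.Str.len := by
      rw [hcl, List.map_map]; rfl
    have h1 := hA.1
    rw [hlen0, hmap] at h1
    rw [h1, List.nil_append]
    have : total - (cleaned.map PySem.Str.len).sum = 0 := by omega
    rw [this]
    have hd := scanl_decomp (cleaned.map PySem.Str.len) 0
    rw [zero_add] at hd
    simp only [List.reverse_append, List.reverse_reverse, List.reverse_cons, List.reverse_nil,
      List.nil_append]
    rw [hsum]
    exact hd.symm
  · show _ = PySem.Str.join "" cleaned
    simpa [hc, String.empty_append] using hA.2
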